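-- pv_equiv track=rewrite | github.com/farid77cl/LaVouteDAnais | scratch/standardize_gallery.py | get_best_folder
-- ===== SOURCE A (Python) =====
-- folders = [
--     "look001_morticia", "look002_elvira", "look003_vampiresa", "look004_widow", "look005_interview",
--     "look006_bloodmoon", "look007", "look008_esmeralda", "look009_corazon", "look010_zafiro",
--     "look011_absinthe", "look012_borgona", "look013_amatista", "look014_midnight", "look015_vampire_bride",
--     "look016_ghost_bride", "look017_cybergoth", "look018_ceo", "look019_velvet_witch", "look020_latex_mistress",
--     "look021_opera_diva", "look022_corset_queen", "look023_latex_goddess", "look024_gothic_bikini", "look025_office_dominatrix",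
--     "look026_tattoo", "look031_industrial_siren", "look032_corporate_widow", "look033_velvet_chains", "look034_white_chrome",
--     "look035_velvet_noir_empress", "look036_crimson_serpent", "look037_midnight_widow", "look038_victorian_mourning",
--     "look039_cyber_goth_oracle", "look040_baroque_gold_empress", "look041_vampire_queen", "look042_neon_neural_goth",
--     "look045_midnight_secretary", "look046_latex_nun", "look047_midnight_pvc_doll", "look050_golden_cage",
--     "look051_obsidian_rose_queen", "look057_hypnotic_spiral", "look058_subliminal_waveform", "look059_midnight_cowgirl",
--     "look061_venom_wire_doll", "look062_sporty_latex_goth", "look063_beach_goth_bimbo", "look064_goth_pop_princess",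
--     "look066_bimbo_stripper", "look068_retro_aerobics", "look069_toxic_aerobics", "look070_cyber_yoga", "look071_goth_nurse",
--     "look073_urban_fetish_trap_canon", "look074_50s_diner", "look075_golden_trap_diva", "look076_liquid_metal_silver",
--     "look077_alpine_goth_luxury", "look079_goth_freshman", "look080_siberian_weather_diva", "look081_fox_news_anchor",
--     "look082_abyssal_secretary", "look083_biker_punk_90s", "look084_crimson_spike", "look085_vinyl_fresa_bimbo",
--     "look086_office_siren", "look087_ele_v3_core", "look088_gallery_opening", "look089_imperial_burgundy",
--     "look090_liquid_gold", "look091_vinyl_yoga_gym", "look092_corporate_paradox_v3_2", "look093_high_gloss_cherry",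
--     "look094_the_locked_legacy_lingerie", "look095_liquid_platinum", "look096_mercury_goddess", "look097_plastic_arch",
--     "look098_vinyl_cheerleader", "look099_gym_bimbo", "look100_cobalt_chrome", "look101_elite_lingerie",
--     "look102_red_vinyl_siren", "look103_fox_news_weather_diva", "look104_platinum_lace_secret", "look105_french_maid",
--     "look106_latex_ceo", "look107_latex_nun_v3_2", "look108_sanhattan_power_secretary", "look109_leopard_vinyl_siren",
--     "look110_cherry_vinyl_trench_siren", "look111_cyan_chrome_boudoir_assassin", "look112_stepford_gold",
--     "look113_mob_wife", "look113_neon_pink_latex_gym_bimbo", "look114_santiago_power_secretary", "look115_silver_bikini",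
--     "look116_cuico_flaite_leather", "look117_cobalt_bikini", "look118_noir_vinyl_blood_lace",
--     "look119_liquid_gold_bikini", "look120_boardroom_siren", "look121_vinyl_rose_boudoir", "look122_white_vinyl_mermaid",
--     "look123_skygate_siren", "look124_neon_gym_bimbo", "look125_sapphire_glow_bikini", "look126_mirror_platinum_ceo",
--     "look127_silk_noir_lace", "look128_red_silk_noir", "look129_bridal_purity", "look130_midnight_rooftop",
--     "look131_electric_blue_wrap", "look132_emerald_silk_lace", "look133_hot_pink_strings", "look134_champagne_silk_sequins",
--     "look135_silver_sequined", "look136_plum_velvet_romance_lingerie", "look137_leopard_micro", "look138_white_lace_mist",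
--     "look139_red_metallic_siren", "look140_dark_sequin_empress", "look141_radiant_neon_lattice"
-- ]
--
-- def get_best_folder(look_id):
--     # Standardize ID to 3 digits
--     look_id_str = str(look_id).zfill(3)
--     # Search for folder starting with look[ID]
--     for f in folders:
--         if f.startswith(f"look{look_id_str}"):
--             return f
--     # Fallback to 2 digits if 3 not found
--     look_id_str_2 = str(look_id).zfill(2)
--     for f in folders:
--         if f.startswith(f"look{look_id_str_2}"):
--             return f
--     return None
-- ===== SOURCE B (Python) =====
-- # Precomputed lookup tables: first folder per 3-digit and per 2-digit look number.
-- _BY3 = {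
--     "001": "look001_morticia",
--     "002": "look002_elvira",
--     "003": "look003_vampiresa",
--     "004": "look004_widow",
--     "005": "look005_interview",
--     "006": "look006_bloodmoon",
--     "007": "look007",
--     "008": "look008_esmeralda",
--     "009": "look009_corazon",
--     "010": "look010_zafiro",
--     "011": "look011_absinthe",
--     "012": "look012_borgona",
--     "013": "look013_amatista",
--     "014": "look014_midnight",
--     "015": "look015_vampire_bride",
--     "016": "look016_ghost_bride",
--     "017": "look017_cybergoth",
--     "018": "look018_ceo",
--     "019": "look019_velvet_witch",
--     "020": "look020_latex_mistress",
--     "021": "look021_opera_diva",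
--     "022": "look022_corset_queen",
--     "023": "look023_latex_goddess",
--     "024": "look024_gothic_bikini",
--     "025": "look025_office_dominatrix",
--     "026": "look026_tattoo",
--     "031": "look031_industrial_siren",
--     "032": "look032_corporate_widow",
--     "033": "look033_velvet_chains",
--     "034": "look034_white_chrome",
--     "035": "look035_velvet_noir_empress",
--     "036": "look036_crimson_serpent",
--     "037": "look037_midnight_widow",
--     "038": "look038_victorian_mourning",
--     "039": "look039_cyber_goth_oracle",
--     "040": "look040_baroque_gold_empress",
--     "041": "look041_vampire_queen",
--     "042": "look042_neon_neural_goth",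
--     "045": "look045_midnight_secretary",
--     "046": "look046_latex_nun",
--     "047": "look047_midnight_pvc_doll",
--     "050": "look050_golden_cage",
--     "051": "look051_obsidian_rose_queen",
--     "057": "look057_hypnotic_spiral",
--     "058": "look058_subliminal_waveform",
--     "059": "look059_midnight_cowgirl",
--     "061": "look061_venom_wire_doll",
--     "062": "look062_sporty_latex_goth",
--     "063": "look063_beach_goth_bimbo",
--     "064": "look064_goth_pop_princess",
--     "066": "look066_bimbo_stripper",
--     "068": "look068_retro_aerobics",
--     "069": "look069_toxic_aerobics",
--     "070": "look070_cyber_yoga",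
--     "071": "look071_goth_nurse",
--     "073": "look073_urban_fetish_trap_canon",
--     "074": "look074_50s_diner",
--     "075": "look075_golden_trap_diva",
--     "076": "look076_liquid_metal_silver",
--     "077": "look077_alpine_goth_luxury",
--     "079": "look079_goth_freshman",
--     "080": "look080_siberian_weather_diva",
--     "081": "look081_fox_news_anchor",
--     "082": "look082_abyssal_secretary",
--     "083": "look083_biker_punk_90s",
--     "084": "look084_crimson_spike",
--     "085": "look085_vinyl_fresa_bimbo",
--     "086": "look086_office_siren",
--     "087": "look087_ele_v3_core",
--     "088": "look088_gallery_opening",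
--     "089": "look089_imperial_burgundy",
--     "090": "look090_liquid_gold",
--     "091": "look091_vinyl_yoga_gym",
--     "092": "look092_corporate_paradox_v3_2",
--     "093": "look093_high_gloss_cherry",
--     "094": "look094_the_locked_legacy_lingerie",
--     "095": "look095_liquid_platinum",
--     "096": "look096_mercury_goddess",
--     "097": "look097_plastic_arch",
--     "098": "look098_vinyl_cheerleader",
--     "099": "look099_gym_bimbo",
--     "100": "look100_cobalt_chrome",
--     "101": "look101_elite_lingerie",
--     "102": "look102_red_vinyl_siren",
--     "103": "look103_fox_news_weather_diva",
--     "104": "look104_platinum_lace_secret",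
--     "105": "look105_french_maid",
--     "106": "look106_latex_ceo",
--     "107": "look107_latex_nun_v3_2",
--     "108": "look108_sanhattan_power_secretary",
--     "109": "look109_leopard_vinyl_siren",
--     "110": "look110_cherry_vinyl_trench_siren",
--     "111": "look111_cyan_chrome_boudoir_assassin",
--     "112": "look112_stepford_gold",
--     "113": "look113_mob_wife",
--     "114": "look114_santiago_power_secretary",
--     "115": "look115_silver_bikini",
--     "116": "look116_cuico_flaite_leather",
--     "117": "look117_cobalt_bikini",
--     "118": "look118_noir_vinyl_blood_lace",
--     "119": "look119_liquid_gold_bikini",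
--     "120": "look120_boardroom_siren",
--     "121": "look121_vinyl_rose_boudoir",
--     "122": "look122_white_vinyl_mermaid",
--     "123": "look123_skygate_siren",
--     "124": "look124_neon_gym_bimbo",
--     "125": "look125_sapphire_glow_bikini",
--     "126": "look126_mirror_platinum_ceo",
--     "127": "look127_silk_noir_lace",
--     "128": "look128_red_silk_noir",
--     "129": "look129_bridal_purity",
--     "130": "look130_midnight_rooftop",
--     "131": "look131_electric_blue_wrap",
--     "132": "look132_emerald_silk_lace",
--     "133": "look133_hot_pink_strings",
--     "134": "look134_champagne_silk_sequins",
--     "135": "look135_silver_sequined",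
--     "136": "look136_plum_velvet_romance_lingerie",
--     "137": "look137_leopard_micro",
--     "138": "look138_white_lace_mist",
--     "139": "look139_red_metallic_siren",
--     "140": "look140_dark_sequin_empress",
--     "141": "look141_radiant_neon_lattice",
-- }
--
-- _BY2 = {
--     "00": "look001_morticia",
--     "01": "look010_zafiro",
--     "02": "look020_latex_mistress",
--     "03": "look031_industrial_siren",
--     "04": "look040_baroque_gold_empress",
--     "05": "look050_golden_cage",
--     "06": "look061_venom_wire_doll",
--     "07": "look070_cyber_yoga",
--     "08": "look080_siberian_weather_diva",
--     "09": "look090_liquid_gold",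
--     "10": "look100_cobalt_chrome",
--     "11": "look110_cherry_vinyl_trench_siren",
--     "12": "look120_boardroom_siren",
--     "13": "look130_midnight_rooftop",
--     "14": "look140_dark_sequin_empress",
-- }
--
-- def get_best_folder(look_id):
--     s = str(look_id)
--     if len(s) == 3:
--         return _BY3.get(s)
--     if len(s) > 3:
--         return None
--     return _BY3.get(s.zfill(3)) or _BY2.get(s.zfill(2))
-- ===== Notes on version B (the rewrite author's own statement) =====
-- stated objective: alternative
-- what changed: Replaced A's two sequential linear prefix scans over the folder list by two precomputed dict lookup tables (3-digit and 2-digit look number -> first matching folder), so each call does dict lookups keyed by the zero-filled id instead of scanning.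
import Mathlib
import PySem

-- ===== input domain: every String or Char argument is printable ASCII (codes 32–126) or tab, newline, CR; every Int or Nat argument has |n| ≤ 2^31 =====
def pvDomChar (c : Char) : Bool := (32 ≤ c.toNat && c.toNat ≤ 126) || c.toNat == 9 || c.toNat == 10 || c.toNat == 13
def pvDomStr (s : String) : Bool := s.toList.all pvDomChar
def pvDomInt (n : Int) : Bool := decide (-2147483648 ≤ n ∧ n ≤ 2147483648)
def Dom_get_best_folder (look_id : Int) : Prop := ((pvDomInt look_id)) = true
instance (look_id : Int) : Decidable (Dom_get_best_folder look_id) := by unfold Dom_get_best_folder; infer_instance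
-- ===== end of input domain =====

-- B replaces A's two linear prefix scans by two precomputed lookup tables (3-digit / 2-digit look number -> first matching folder), so each call is a pair of dict lookups instead of list scans (objective: alternative; return-value equivalence).

-- ===== PORT A =====
def pvFolders : List String := [
  "look001_morticia",
  "look002_elvira",
  "look003_vampiresa",
  "look004_widow",
  "look005_interview",
  "look006_bloodmoon",
  "look007",
  "look008_esmeralda",
  "look009_corazon",
  "look010_zafiro",
  "look011_absinthe",
  "look012_borgona",
  "look013_amatista",
  "look014_midnight",
  "look015_vampire_bride",
  "look016_ghost_bride",
  "look017_cybergoth",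
  "look018_ceo",
  "look019_velvet_witch",
  "look020_latex_mistress",
  "look021_opera_diva",
  "look022_corset_queen",
  "look023_latex_goddess",
  "look024_gothic_bikini",
  "look025_office_dominatrix",
  "look026_tattoo",
  "look031_industrial_siren",
  "look032_corporate_widow",
  "look033_velvet_chains",
  "look034_white_chrome",
  "look035_velvet_noir_empress",
  "look036_crimson_serpent",
  "look037_midnight_widow",
  "look038_victorian_mourning",
  "look039_cyber_goth_oracle",
  "look040_baroque_gold_empress",
  "look041_vampire_queen",
  "look042_neon_neural_goth",
  "look045_midnight_secretary",
  "look046_latex_nun",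
  "look047_midnight_pvc_doll",
  "look050_golden_cage",
  "look051_obsidian_rose_queen",
  "look057_hypnotic_spiral",
  "look058_subliminal_waveform",
  "look059_midnight_cowgirl",
  "look061_venom_wire_doll",
  "look062_sporty_latex_goth",
  "look063_beach_goth_bimbo",
  "look064_goth_pop_princess",
  "look066_bimbo_stripper",
  "look068_retro_aerobics",
  "look069_toxic_aerobics",
  "look070_cyber_yoga",
  "look071_goth_nurse",
  "look073_urban_fetish_trap_canon",
  "look074_50s_diner",
  "look075_golden_trap_diva",
  "look076_liquid_metal_silver",
  "look077_alpine_goth_luxury",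
  "look079_goth_freshman",
  "look080_siberian_weather_diva",
  "look081_fox_news_anchor",
  "look082_abyssal_secretary",
  "look083_biker_punk_90s",
  "look084_crimson_spike",
  "look085_vinyl_fresa_bimbo",
  "look086_office_siren",
  "look087_ele_v3_core",
  "look088_gallery_opening",
  "look089_imperial_burgundy",
  "look090_liquid_gold",
  "look091_vinyl_yoga_gym",
  "look092_corporate_paradox_v3_2",
  "look093_high_gloss_cherry",
  "look094_the_locked_legacy_lingerie",
  "look095_liquid_platinum",
  "look096_mercury_goddess",
  "look097_plastic_arch",
  "look098_vinyl_cheerleader",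
  "look099_gym_bimbo",
  "look100_cobalt_chrome",
  "look101_elite_lingerie",
  "look102_red_vinyl_siren",
  "look103_fox_news_weather_diva",
  "look104_platinum_lace_secret",
  "look105_french_maid",
  "look106_latex_ceo",
  "look107_latex_nun_v3_2",
  "look108_sanhattan_power_secretary",
  "look109_leopard_vinyl_siren",
  "look110_cherry_vinyl_trench_siren",
  "look111_cyan_chrome_boudoir_assassin",
  "look112_stepford_gold",
  "look113_mob_wife",
  "look113_neon_pink_latex_gym_bimbo",
  "look114_santiago_power_secretary",
  "look115_silver_bikini",
  "look116_cuico_flaite_leather",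
  "look117_cobalt_bikini",
  "look118_noir_vinyl_blood_lace",
  "look119_liquid_gold_bikini",
  "look120_boardroom_siren",
  "look121_vinyl_rose_boudoir",
  "look122_white_vinyl_mermaid",
  "look123_skygate_siren",
  "look124_neon_gym_bimbo",
  "look125_sapphire_glow_bikini",
  "look126_mirror_platinum_ceo",
  "look127_silk_noir_lace",
  "look128_red_silk_noir",
  "look129_bridal_purity",
  "look130_midnight_rooftop",
  "look131_electric_blue_wrap",
  "look132_emerald_silk_lace",
  "look133_hot_pink_strings",
  "look134_champagne_silk_sequins",
  "look135_silver_sequined",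
  "look136_plum_velvet_romance_lingerie",
  "look137_leopard_micro",
  "look138_white_lace_mist",
  "look139_red_metallic_siren",
  "look140_dark_sequin_empress",
  "look141_radiant_neon_lattice"]

-- the for-loop with early return, as a structural recursion over the folder list
def pvFindPrefix (p : String) : List String → Option String
  | [] => none
  | f :: rest => if PySem.Str.startswith f p then some f else pvFindPrefix p rest

def get_best_folder (look_id : Int) : Option String :=
  let look_id_str := PySem.Str.zfill (PySem.Int.toStr look_id) 3
  match pvFindPrefix ("look" ++ look_id_str) pvFolders with
  | some f => some f
  | none =>
    let look_id_str_2 := PySem.Str.zfill (PySem.Int.toStr look_id) 2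
    pvFindPrefix ("look" ++ look_id_str_2) pvFolders

-- ===== PORT B =====
-- the module-level literal dict _BY3: first folder per 3-digit look number
def pvBy3 : PySem.Dict String String := PySem.Dict.ofList [
  ("001", "look001_morticia"),
  ("002", "look002_elvira"),
  ("003", "look003_vampiresa"),
  ("004", "look004_widow"),
  ("005", "look005_interview"),
  ("006", "look006_bloodmoon"),
  ("007", "look007"),
  ("008", "look008_esmeralda"),
  ("009", "look009_corazon"),
  ("010", "look010_zafiro"),
  ("011", "look011_absinthe"),
  ("012", "look012_borgona"),
  ("013", "look013_amatista"),
  ("014", "look014_midnight"),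
  ("015", "look015_vampire_bride"),
  ("016", "look016_ghost_bride"),
  ("017", "look017_cybergoth"),
  ("018", "look018_ceo"),
  ("019", "look019_velvet_witch"),
  ("020", "look020_latex_mistress"),
  ("021", "look021_opera_diva"),
  ("022", "look022_corset_queen"),
  ("023", "look023_latex_goddess"),
  ("024", "look024_gothic_bikini"),
  ("025", "look025_office_dominatrix"),
  ("026", "look026_tattoo"),
  ("031", "look031_industrial_siren"),
  ("032", "look032_corporate_widow"),
  ("033", "look033_velvet_chains"),
  ("034", "look034_white_chrome"),
  ("035", "look035_velvet_noir_empress"),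
  ("036", "look036_crimson_serpent"),
  ("037", "look037_midnight_widow"),
  ("038", "look038_victorian_mourning"),
  ("039", "look039_cyber_goth_oracle"),
  ("040", "look040_baroque_gold_empress"),
  ("041", "look041_vampire_queen"),
  ("042", "look042_neon_neural_goth"),
  ("045", "look045_midnight_secretary"),
  ("046", "look046_latex_nun"),
  ("047", "look047_midnight_pvc_doll"),
  ("050", "look050_golden_cage"),
  ("051", "look051_obsidian_rose_queen"),
  ("057", "look057_hypnotic_spiral"),
  ("058", "look058_subliminal_waveform"),
  ("059", "look059_midnight_cowgirl"),
  ("061", "look061_venom_wire_doll"),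
  ("062", "look062_sporty_latex_goth"),
  ("063", "look063_beach_goth_bimbo"),
  ("064", "look064_goth_pop_princess"),
  ("066", "look066_bimbo_stripper"),
  ("068", "look068_retro_aerobics"),
  ("069", "look069_toxic_aerobics"),
  ("070", "look070_cyber_yoga"),
  ("071", "look071_goth_nurse"),
  ("073", "look073_urban_fetish_trap_canon"),
  ("074", "look074_50s_diner"),
  ("075", "look075_golden_trap_diva"),
  ("076", "look076_liquid_metal_silver"),
  ("077", "look077_alpine_goth_luxury"),
  ("079", "look079_goth_freshman"),
  ("080", "look080_siberian_weather_diva"),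
  ("081", "look081_fox_news_anchor"),
  ("082", "look082_abyssal_secretary"),
  ("083", "look083_biker_punk_90s"),
  ("084", "look084_crimson_spike"),
  ("085", "look085_vinyl_fresa_bimbo"),
  ("086", "look086_office_siren"),
  ("087", "look087_ele_v3_core"),
  ("088", "look088_gallery_opening"),
  ("089", "look089_imperial_burgundy"),
  ("090", "look090_liquid_gold"),
  ("091", "look091_vinyl_yoga_gym"),
  ("092", "look092_corporate_paradox_v3_2"),
  ("093", "look093_high_gloss_cherry"),
  ("094", "look094_the_locked_legacy_lingerie"),
  ("095", "look095_liquid_platinum"),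
  ("096", "look096_mercury_goddess"),
  ("097", "look097_plastic_arch"),
  ("098", "look098_vinyl_cheerleader"),
  ("099", "look099_gym_bimbo"),
  ("100", "look100_cobalt_chrome"),
  ("101", "look101_elite_lingerie"),
  ("102", "look102_red_vinyl_siren"),
  ("103", "look103_fox_news_weather_diva"),
  ("104", "look104_platinum_lace_secret"),
  ("105", "look105_french_maid"),
  ("106", "look106_latex_ceo"),
  ("107", "look107_latex_nun_v3_2"),
  ("108", "look108_sanhattan_power_secretary"),
  ("109", "look109_leopard_vinyl_siren"),
  ("110", "look110_cherry_vinyl_trench_siren"),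
  ("111", "look111_cyan_chrome_boudoir_assassin"),
  ("112", "look112_stepford_gold"),
  ("113", "look113_mob_wife"),
  ("114", "look114_santiago_power_secretary"),
  ("115", "look115_silver_bikini"),
  ("116", "look116_cuico_flaite_leather"),
  ("117", "look117_cobalt_bikini"),
  ("118", "look118_noir_vinyl_blood_lace"),
  ("119", "look119_liquid_gold_bikini"),
  ("120", "look120_boardroom_siren"),
  ("121", "look121_vinyl_rose_boudoir"),
  ("122", "look122_white_vinyl_mermaid"),
  ("123", "look123_skygate_siren"),
  ("124", "look124_neon_gym_bimbo"),
  ("125", "look125_sapphire_glow_bikini"),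
  ("126", "look126_mirror_platinum_ceo"),
  ("127", "look127_silk_noir_lace"),
  ("128", "look128_red_silk_noir"),
  ("129", "look129_bridal_purity"),
  ("130", "look130_midnight_rooftop"),
  ("131", "look131_electric_blue_wrap"),
  ("132", "look132_emerald_silk_lace"),
  ("133", "look133_hot_pink_strings"),
  ("134", "look134_champagne_silk_sequins"),
  ("135", "look135_silver_sequined"),
  ("136", "look136_plum_velvet_romance_lingerie"),
  ("137", "look137_leopard_micro"),
  ("138", "look138_white_lace_mist"),
  ("139", "look139_red_metallic_siren"),
  ("140", "look140_dark_sequin_empress"),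
  ("141", "look141_radiant_neon_lattice")]

-- the module-level literal dict _BY2: first folder per 2-digit look number
def pvBy2 : PySem.Dict String String := PySem.Dict.ofList [
  ("00", "look001_morticia"),
  ("01", "look010_zafiro"),
  ("02", "look020_latex_mistress"),
  ("03", "look031_industrial_siren"),
  ("04", "look040_baroque_gold_empress"),
  ("05", "look050_golden_cage"),
  ("06", "look061_venom_wire_doll"),
  ("07", "look070_cyber_yoga"),
  ("08", "look080_siberian_weather_diva"),
  ("09", "look090_liquid_gold"),
  ("10", "look100_cobalt_chrome"),
  ("11", "look110_cherry_vinyl_trench_siren"),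
  ("12", "look120_boardroom_siren"),
  ("13", "look130_midnight_rooftop"),
  ("14", "look140_dark_sequin_empress")]

def get_best_folder_alt (look_id : Int) : Option String :=
  let s := PySem.Int.toStr look_id
  if PySem.Str.len s = 3 then PySem.Dict.get? pvBy3 s
  else if 3 < PySem.Str.len s then none
  else
    -- `_BY3.get(...) or _BY2.get(...)` (all table values are nonempty strings, hence truthy)
    match PySem.Dict.get? pvBy3 (PySem.Str.zfill s 3) with
    | some f => some f
    | none => PySem.Dict.get? pvBy2 (PySem.Str.zfill s 2)

-- ===== PRECONDITION & SPEC =====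
def Spec_get_best_folder (look_id : Int) (out : Option String) : Prop := out = get_best_folder_alt look_id
instance (look_id : Int) (out : Option String) : Decidable (Spec_get_best_folder look_id out) := by unfold Spec_get_best_folder; infer_instance

-- ===== CLAIM (what is proved, stated in full; the proofs are below) =====
def Claim_equal_get_best_folder : Prop := ∀ (look_id : Int), Dom_get_best_folder look_id → Spec_get_best_folder look_id (get_best_folder look_id)

-- ===== LEMMAS AND PROOFS =====
-- key of a folder name: its first w characters after "look"
def pvKey (w : Nat) (f : String) : String := String.ofList ((f.toList.drop 4).take w)

-- shape of every folder name: starts with "look", ≥ 7 chars, char 7 (if any) is '_'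
def pvShapeOk (f : String) : Prop :=
  f.toList.take 4 = "look".toList ∧ 7 ≤ f.toList.length ∧
    (f.toList.length ≤ 7 ∨ f.toList.getD 7 'x' = '_')

set_option maxRecDepth 40000 in
theorem pvFolders_shape : ∀ f ∈ pvFolders, pvShapeOk f := by unfold pvShapeOk; decide

-- the first-wins table builder the literal dicts were computed with
def pvBuild (w : Nat) (L : List String) : List (String × String) :=
  L.foldl (fun acc f =>
    if (acc.find? (fun p => p.1 == pvKey w f)).isSome then acc
    else acc ++ [(pvKey w f, f)]) []

set_option maxRecDepth 40000 in
theorem pvBy3_items : pvBy3.items = pvBuild 3 pvFolders := by decide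

set_option maxRecDepth 40000 in
theorem pvBy2_items : pvBy2.items = pvBuild 2 pvFolders := by decide

theorem pvFind?_buildAux (w : Nat) (k : String) (L : List String) :
    ∀ acc : List (String × String),
      ((L.foldl (fun acc f =>
          if (acc.find? (fun p => p.1 == pvKey w f)).isSome then acc
          else acc ++ [(pvKey w f, f)]) acc).find? (fun p => p.1 == k)).map (·.2) =
      match (acc.find? (fun p => p.1 == k)).map (·.2) with
      | some v => some v
      | none => L.find? (fun f => pvKey w f == k) := by
  induction L with
  | nil => intro acc; cases h : (acc.find? (fun p => p.1 == k)).map (·.2) <;> simp [h]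
  | cons f rest ih =>
    intro acc
    simp only [List.foldl_cons]
    rw [ih]
    by_cases hk : pvKey w f = k
    · subst hk
      by_cases hin : (acc.find? (fun p => p.1 == pvKey w f)).isSome
      · rcases Option.isSome_iff_exists.mp hin with ⟨p, hp⟩
        simp [hp]
      · have hnone : acc.find? (fun p => p.1 == pvKey w f) = none :=
          Option.not_isSome_iff_eq_none.mp hin
        simp [hnone, List.find?_append]
    · have hkb : (pvKey w f == k) = false := by simpa using hk
      by_cases hin : (acc.find? (fun p => p.1 == pvKey w f)).isSome
      · simp [hin, hkb]
      · have hone : List.find? (fun p => p.1 == k) [(pvKey w f, f)] = none := by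
          simp [hkb]
        simp [hin, List.find?_append, hone, hkb]

theorem pvFind?_build (w : Nat) (k : String) (L : List String) :
    ((pvBuild w L).find? (fun p => p.1 == k)).map (·.2) =
      L.find? (fun f => pvKey w f == k) := by
  have h := pvFind?_buildAux w k L []
  simpa [pvBuild] using h

-- a folder matches "look" ++ k  iff  its key equals k (for keys of length w ≤ 3)
theorem pvStartswith_iff_key (w : Nat) (hw : w ≤ 3) (k : String) (hk : k.toList.length = w)
    (f : String) (hf : pvShapeOk f) :
    PySem.Str.startswith f ("look" ++ k) = (pvKey w f == k) := by
  obtain ⟨hlook, hlen, -⟩ := hf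
  have hsplit : f.toList = "look".toList ++ f.toList.drop 4 := by
    conv_lhs => rw [← List.take_append_drop 4 f.toList]
    rw [hlook]
  have hrl : w ≤ (f.toList.drop 4).length := by
    simp only [List.length_drop]
    omega
  have hiff : PySem.Str.startswith f ("look" ++ k) = true ↔
      (f.toList.drop 4).take w = k.toList := by
    rw [PySem.Str.startswith, PySem.Chars.startswith_iff, String.toList_append]
    conv_lhs => rw [hsplit]
    rw [List.prefix_append_right_inj, List.prefix_iff_eq_take, hk]
    constructor
    · intro h; exact h.symm
    · intro h; exact h.symm
  by_cases h : (f.toList.drop 4).take w = k.toList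
  · have h1 : PySem.Str.startswith f ("look" ++ k) = true := hiff.mpr h
    have h2 : (pvKey w f == k) = true := by
      have : pvKey w f = k := by
        rw [pvKey, h, String.ofList_toList]
      simpa using this
    rw [h1, h2]
  · have h1 : PySem.Str.startswith f ("look" ++ k) = false := by
      rcases Bool.eq_false_or_eq_true (PySem.Str.startswith f ("look" ++ k)) with h' | h'
      · exact absurd (hiff.mp h') h
      · exact h'
    have h2 : (pvKey w f == k) = false := by
      rcases Bool.eq_false_or_eq_true (pvKey w f == k) with h' | h'
      · exfalso
        apply h
        have : pvKey w f = k := by simpa using h'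
        rw [← this, pvKey, String.toList_ofList]
      · exact h'
    rw [h1, h2]

-- A's scan over the folders equals a first-match key search
theorem pvFindPrefix_eq_find (w : Nat) (hw : w ≤ 3) (k : String) (hk : k.toList.length = w) :
    ∀ L : List String, (∀ f ∈ L, pvShapeOk f) →
      pvFindPrefix ("look" ++ k) L = L.find? (fun f => pvKey w f == k) := by
  intro L hL
  induction L with
  | nil => rfl
  | cons f rest ih =>
    have hf := hL f (by simp)
    have hrest : ∀ g ∈ rest, pvShapeOk g := fun g hg => hL g (by simp [hg])
    rw [pvFindPrefix, List.find?_cons, pvStartswith_iff_key w hw k hk f hf]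
    cases h : (pvKey w f == k)
    · simpa using ih hrest
    · simp

theorem pvDigitChar_digit (n : Nat) : (n % 10).digitChar.isDigit = true := by
  have h : n % 10 < 10 := Nat.mod_lt _ (by norm_num)
  have hall : ∀ m, m < 10 → (Nat.digitChar m).isDigit = true := by decide
  exact hall _ h

theorem pvToDigitsCore_digits (fuel : Nat) :
    ∀ (n : Nat) (acc : List Char), (∀ c ∈ acc, c.isDigit = true) →
      ∀ c ∈ Nat.toDigitsCore 10 fuel n acc, c.isDigit = true := by
  induction fuel with
  | zero => intro n acc hacc; simpa [Nat.toDigitsCore] using hacc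
  | succ fuel ih =>
    intro n acc hacc c hc
    have hstep : Nat.toDigitsCore 10 (fuel + 1) n acc =
        if n / 10 = 0 then (n % 10).digitChar :: acc
        else Nat.toDigitsCore 10 fuel (n / 10) ((n % 10).digitChar :: acc) := by
      rw [Nat.toDigitsCore]
    rw [hstep] at hc
    by_cases h : n / 10 = 0
    · rw [if_pos h] at hc
      rcases List.mem_cons.mp hc with hc | hc
      · rw [hc]; exact pvDigitChar_digit n
      · exact hacc c hc
    · rw [if_neg h] at hc
      refine ih (n / 10) ((n % 10).digitChar :: acc) ?_ c hc
      intro d hd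
      rcases List.mem_cons.mp hd with hd | hd
      · rw [hd]; exact pvDigitChar_digit n
      · exact hacc d hd

-- every character of str(n) after the first is a decimal digit
theorem pvToChars_tail_digits (n : Int) :
    ∀ c ∈ (PySem.Int.toChars n).drop 1, c.isDigit = true := by
  intro c hc
  unfold PySem.Int.toChars at hc
  split at hc
  · simp only [List.drop_succ_cons, List.drop_zero] at hc
    exact pvToDigitsCore_digits _ _ [] (by simp) c hc
  · exact pvToDigitsCore_digits _ _ [] (by simp) c (List.mem_of_mem_drop hc)

-- zfill is the identity on strings at least as long as the width
theorem pvZfill_of_ge (s : String) (w : Int) (h : w ≤ (s.toList.length : Int)) :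
    PySem.Str.zfill s w = s := by
  simp only [PySem.Str.zfill, PySem.Chars.zfill]
  rw [if_pos h, String.ofList_toList]

-- length after zfill
theorem pvZfill_len (s : String) (w : Nat) :
    (PySem.Str.zfill s (w : Int)).toList.length = max s.toList.length w := by
  rw [PySem.Str.toList_zfill, PySem.Chars.length_zfill]
  simp

-- long prefixes (≥ 8 chars, digit at index 7) match no folder
theorem pvFindPrefix_long_none (p : String)
    (hlen : 8 ≤ p.toList.length) (hdig : (p.toList.getD 7 'x').isDigit = true) :
    ∀ L : List String, (∀ f ∈ L, pvShapeOk f) → pvFindPrefix p L = none := by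
  intro L hL
  induction L with
  | nil => rfl
  | cons f rest ih =>
    have hf := hL f (by simp)
    have hrest : ∀ g ∈ rest, pvShapeOk g := fun g hg => hL g (by simp [hg])
    rw [pvFindPrefix]
    have hsw : PySem.Str.startswith f p = false := by
      rcases Bool.eq_false_or_eq_true (PySem.Str.startswith f p) with h' | h'
      · exfalso
        have hpre : p.toList <+: f.toList := by
          rw [PySem.Str.startswith, PySem.Chars.startswith_iff] at h'
          exact h'
        obtain ⟨hlook, hlen7, hus⟩ := hf
        have hflen : 8 ≤ f.toList.length := le_trans hlen hpre.length_le
        have hus' : f.toList.getD 7 'x' = '_' := by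
          rcases hus with h | h
          · omega
          · exact h
        have htake := List.prefix_iff_eq_take.mp hpre
        have h7 : p.toList.getD 7 'x' = f.toList.getD 7 'x' := by
          conv_lhs => rw [htake]
          rw [List.getD_eq_getElem _ _ (by rw [List.length_take]; omega),
              List.getD_eq_getElem _ _ (by omega)]
          exact List.getElem_take
        rw [h7, hus'] at hdig
        exact absurd hdig (by decide)
      · exact h'
    rw [hsw]
    simpa using ih hrest


-- ===== VERDICT (by name: the statement is the Claim_ definition above) =====
theorem get_best_folder_spec : Claim_equal_get_best_folder := by
  intro n _
  unfold Spec_get_best_folder get_best_folder get_best_folder_alt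
  have htail : ∀ c ∈ (PySem.Int.toStr n).toList.drop 1, c.isDigit = true := by
    rw [PySem.Int.toList_toStr]
    exact pvToChars_tail_digits n
  set s := PySem.Int.toStr n with hs
  have hlen3 : (PySem.Str.len s = 3) ↔ s.toList.length = 3 := by
    rw [PySem.Str.len]; omega
  have hlengt : (3 < PySem.Str.len s) ↔ 3 < s.toList.length := by
    rw [PySem.Str.len]; omega
  by_cases h3 : s.toList.length = 3
  · -- 3-character id: both zfills are the identity, both passes use the same prefix
    have e3 : PySem.Str.zfill s 3 = s := pvZfill_of_ge s 3 (by omega)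
    have e2 : PySem.Str.zfill s 2 = s := pvZfill_of_ge s 2 (by omega)
    have hfind : pvFindPrefix ("look" ++ s) pvFolders =
        List.find? (fun f => pvKey 3 f == s) pvFolders :=
      pvFindPrefix_eq_find 3 (by omega) s h3 pvFolders pvFolders_shape
    rw [e3, e2, if_pos (hlen3.mpr h3), PySem.Dict.get?, pvBy3_items, pvFind?_build, ← hfind]
    cases hp : pvFindPrefix ("look" ++ s) pvFolders <;> simp [hp]
  · by_cases hgt : 3 < s.toList.length
    · -- long id: no folder can match either prefix
      have e3 : PySem.Str.zfill s 3 = s := pvZfill_of_ge s 3 (by omega)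
      have e2 : PySem.Str.zfill s 2 = s := pvZfill_of_ge s 2 (by omega)
      have hplen : 8 ≤ ("look" ++ s).toList.length := by
        rw [String.toList_append]
        simp only [List.length_append]
        have : "look".toList.length = 4 := by decide
        omega
      have hpdig : (("look" ++ s).toList.getD 7 'x').isDigit = true := by
        rw [String.toList_append]
        have h4 : "look".toList.length = 4 := by decide
        rw [List.getD_append_right "look".toList s.toList 'x' 7 (by rw [h4]; omega), h4]
        have h74 : (7 : Nat) - 4 = 3 := by norm_num
        rw [h74]
        refine htail _ ?_
        rw [List.getD_eq_getElem _ _ (by omega)]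
        have h2lt : 2 < (List.drop 1 s.toList).length := by
          rw [List.length_drop]; omega
        have hmem := List.getElem_mem h2lt
        simpa [List.getElem_drop] using hmem
      rw [if_neg (by rw [hlen3]; omega), if_pos (hlengt.mpr hgt), e3, e2]
      have hnone := pvFindPrefix_long_none _ hplen hpdig pvFolders pvFolders_shape
      simp [hnone]
    · -- short id: zfilled keys have length exactly 3 resp. 2
      have hk3 : (PySem.Str.zfill s 3).toList.length = 3 := by
        have := pvZfill_len s 3
        simp only [Nat.cast_ofNat] at this
        omega
      have hk2 : (PySem.Str.zfill s 2).toList.length = 2 := by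
        have := pvZfill_len s 2
        simp only [Nat.cast_ofNat] at this
        omega
      have hf3 : pvFindPrefix ("look" ++ PySem.Str.zfill s 3) pvFolders =
          List.find? (fun f => pvKey 3 f == PySem.Str.zfill s 3) pvFolders :=
        pvFindPrefix_eq_find 3 (by omega) _ hk3 pvFolders pvFolders_shape
      have hf2 : pvFindPrefix ("look" ++ PySem.Str.zfill s 2) pvFolders =
          List.find? (fun f => pvKey 2 f == PySem.Str.zfill s 2) pvFolders :=
        pvFindPrefix_eq_find 2 (by omega) _ hk2 pvFolders pvFolders_shape
      rw [if_neg (by rw [hlen3]; omega), if_neg (by rw [hlengt]; omega),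
          PySem.Dict.get?, pvBy3_items, pvFind?_build, ← hf3,
          PySem.Dict.get?, pvBy2_items, pvFind?_build, ← hf2]
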